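-- pv_equiv track=rewrite | github.com/Nhatkma/Thuat_toan_attt | Cau_25.py | timKiem
-- ===== SOURCE A (Python) =====
-- def timKiem(M,N,mang):
--     def deQuy(batDau,demSoTrongMangKiemTra,tongHienTai,mangKiemTra):
--         if demSoTrongMangKiemTra == M :
--             if tongHienTai == N :
--                 return mangKiemTra
--             return None
--         if batDau >= len(mang) or tongHienTai > N :
--             return None
--         for i in range(batDau,len(mang)):
--             mangKiemTra.append(mang[i])
--             kq = deQuy(i + 1,demSoTrongMangKiemTra + 1, tongHienTai + mang[i],mangKiemTra )
--             if kq: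
--                 return kq
--             mangKiemTra.pop()
--         return None
--     return deQuy(0,0,0,[])
-- ===== SOURCE B (Python) =====
-- def timKiem(M, N, mang):
--     L = len(mang)
--     memo = {}
--
--     def feas(start, count, total):
--         if count == M:
--             return total == N
--         if start >= L or total > N:
--             return False
--         key = (start, count, total)
--         r = memo.get(key)
--         if r is None:
--             r = any(feas(i + 1, count + 1, total + mang[i]) for i in range(start, L))
--             memo[key] = r
--         return r
--
--     if not feas(0, 0, 0):
--         return None
--     res = []
--     start = 0
--     count = 0
--     total = 0
--     while count != M:
--         i = start
--         while not feas(i + 1, count + 1, total + mang[i]):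
--             i += 1
--         res.append(mang[i])
--         total += mang[i]
--         count += 1
--         start = i + 1
--     return res
-- ===== Notes on version B (the rewrite author's own statement) =====
-- stated objective: alternative
-- what changed: Replaces the list-building backtracking DFS with a memoized boolean feasibility predicate over (start, count, sum) states plus a greedy front-to-back reconstruction of the DFS-first subset.
import Mathlib
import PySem

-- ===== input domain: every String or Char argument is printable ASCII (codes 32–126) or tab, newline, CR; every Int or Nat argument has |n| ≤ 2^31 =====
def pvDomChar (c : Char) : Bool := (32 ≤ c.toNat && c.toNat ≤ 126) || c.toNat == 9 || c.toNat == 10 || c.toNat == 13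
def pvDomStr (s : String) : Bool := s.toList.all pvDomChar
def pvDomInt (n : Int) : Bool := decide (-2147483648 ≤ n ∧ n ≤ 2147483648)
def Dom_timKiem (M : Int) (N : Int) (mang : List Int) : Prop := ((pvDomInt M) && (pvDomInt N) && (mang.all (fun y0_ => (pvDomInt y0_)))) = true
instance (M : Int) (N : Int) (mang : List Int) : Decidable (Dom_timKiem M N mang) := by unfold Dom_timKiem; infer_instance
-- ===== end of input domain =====

-- B replaces A's list-building backtracking DFS by a memoized feasibility predicate over
-- (start, count, sum) plus a greedy reconstruction of the DFS-first subset.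

-- ===== PORT A =====
-- literal transliteration of A's deQuy: dem/batDau are the nonnegative Python ints,
-- the for-loop with early return on a truthy (non-empty) result is loopA;
-- the append/pop mutation becomes passing acc by value.
mutual
def deQuyA (M N : Int) (mang : List Int) (batDau dem : Nat) (tong : Int) (acc : List Int) :
    Option (List Int) :=
  if (dem : Int) = M then (if tong = N then some acc else none)
  else if mang.length ≤ batDau || decide (tong > N) then none
  else loopA M N mang batDau dem tong acc
termination_by 2 * (mang.length + 1 - batDau) + 1
decreasing_by simp_all

def loopA (M N : Int) (mang : List Int) (i dem : Nat) (tong : Int) (acc : List Int) :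
    Option (List Int) :=
  if h : i < mang.length then
    match deQuyA M N mang (i + 1) (dem + 1) (tong + mang[i]) (acc ++ [mang[i]]) with
    | some kq => if kq.isEmpty then loopA M N mang (i + 1) dem tong acc else some kq
    | none => loopA M N mang (i + 1) dem tong acc
  else none
termination_by 2 * (mang.length + 1 - i)
decreasing_by all_goals omega
end

def timKiem (M : Int) (N : Int) (mang : List Int) : Option (List Int) :=
  deQuyA M N mang 0 0 0 []

-- ===== PORT B =====
-- memo is Source B's dict keyed by (start, count, total); anyLoopB is the short-circuiting
-- any(...) generator, threading the dict it mutates.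
mutual
def feasB (M N : Int) (mang : List Int) (start count : Nat) (total : Int)
    (memo : PySem.Dict (Nat × Nat × Int) Bool) :
    Bool × PySem.Dict (Nat × Nat × Int) Bool :=
  if (count : Int) = M then (decide (total = N), memo)
  else if mang.length ≤ start || decide (total > N) then (false, memo)
  else
    match memo.get? (start, count, total) with
    | some r => (r, memo)
    | none =>
      let p := anyLoopB M N mang start count total memo
      (p.1, p.2.insert (start, count, total) p.1)
termination_by 2 * (mang.length + 1 - start) + 1
decreasing_by simp_all

def anyLoopB (M N : Int) (mang : List Int) (i count : Nat) (total : Int)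
    (memo : PySem.Dict (Nat × Nat × Int) Bool) :
    Bool × PySem.Dict (Nat × Nat × Int) Bool :=
  if h : i < mang.length then
    let p := feasB M N mang (i + 1) (count + 1) (total + mang[i]) memo
    if p.1 then (true, p.2) else anyLoopB M N mang (i + 1) count total p.2
  else (false, memo)
termination_by 2 * (mang.length + 1 - i)
decreasing_by all_goals omega
end

-- the inner `while not feas(i+1, count+1, total+mang[i]): i += 1` scan; `none` marks the
-- i = len(mang) IndexError case, unreachable when the outer state is feasible.
def reconInnerB (M N : Int) (mang : List Int) (count : Nat) (total : Int) (i : Nat)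
    (memo : PySem.Dict (Nat × Nat × Int) Bool) :
    Option ({j : Nat // i ≤ j ∧ j < mang.length} × PySem.Dict (Nat × Nat × Int) Bool) :=
  if h : i < mang.length then
    let p := feasB M N mang (i + 1) (count + 1) (total + mang[i]) memo
    if p.1 then some (⟨i, Nat.le_refl i, h⟩, p.2)
    else (reconInnerB M N mang count total (i + 1) p.2).map
      (fun q => (⟨q.1.1, by have := q.1.2; omega, by have := q.1.2; exact this.2⟩, q.2))
  else none
termination_by mang.length - i

-- the outer `while count != M` loop building res; the `none` branch is the same
-- unreachable-IndexError guard.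
def reconOuterB (M N : Int) (mang : List Int) (start count : Nat) (total : Int)
    (acc : List Int) (memo : PySem.Dict (Nat × Nat × Int) Bool) : List Int :=
  if (count : Int) = M then acc
  else
    match reconInnerB M N mang count total start memo with
    | none => acc
    | some (⟨i, _, h⟩, memo') =>
      reconOuterB M N mang (i + 1) (count + 1) (total + mang[i]) (acc ++ [mang[i]]) memo'
termination_by mang.length - start
decreasing_by omega

def timKiem_alt (M : Int) (N : Int) (mang : List Int) : Option (List Int) :=
  let p := feasB M N mang 0 0 0 PySem.Dict.empty
  if p.1 then some (reconOuterB M N mang 0 0 0 [] p.2) else none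

-- ===== PRECONDITION & SPEC =====
def Spec_timKiem (M : Int) (N : Int) (mang : List Int) (out : Option (List Int)) : Prop := out = timKiem_alt M N mang
instance (M : Int) (N : Int) (mang : List Int) (out : Option (List Int)) : Decidable (Spec_timKiem M N mang out) := by unfold Spec_timKiem; infer_instance

-- ===== CLAIM (what is proved, stated in full; the proofs are below) =====
def Claim_equal_timKiem : Prop := ∀ (M : Int) (N : Int) (mang : List Int), Dom_timKiem M N mang → Spec_timKiem M N mang (timKiem M N mang)

-- ===== LEMMAS AND PROOFS =====

-- pure (memo-free) feasibility, same recursion as feasB/anyLoopB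
mutual
def FB (M N : Int) (mang : List Int) (start count : Nat) (total : Int) : Bool :=
  if (count : Int) = M then decide (total = N)
  else if mang.length ≤ start || decide (total > N) then false
  else FL M N mang start count total
termination_by 2 * (mang.length + 1 - start) + 1
decreasing_by simp_all

def FL (M N : Int) (mang : List Int) (i count : Nat) (total : Int) : Bool :=
  if h : i < mang.length then
    FB M N mang (i + 1) (count + 1) (total + mang[i]) || FL M N mang (i + 1) count total
  else false
termination_by 2 * (mang.length + 1 - i)
decreasing_by all_goals omega
end

-- pure reconstruction
def RInner (M N : Int) (mang : List Int) (count : Nat) (total : Int) (i : Nat) :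
    Option {j : Nat // i ≤ j ∧ j < mang.length} :=
  if h : i < mang.length then
    if FB M N mang (i + 1) (count + 1) (total + mang[i]) then some ⟨i, Nat.le_refl i, h⟩
    else (RInner M N mang count total (i + 1)).map
      (fun q => ⟨q.1, by have := q.2; omega, by have := q.2; exact this.2⟩)
  else none
termination_by mang.length - i

def ROuter (M N : Int) (mang : List Int) (start count : Nat) (total : Int)
    (acc : List Int) : List Int :=
  if (count : Int) = M then acc
  else
    match RInner M N mang count total start with
    | none => acc
    | some ⟨i, _, h⟩ =>
      ROuter M N mang (i + 1) (count + 1) (total + mang[i]) (acc ++ [mang[i]])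
termination_by mang.length - start
decreasing_by omega

-- the memo invariant: every entry is the pure feasibility value
def GoodMemo (M N : Int) (mang : List Int) (memo : PySem.Dict (Nat × Nat × Int) Bool) : Prop :=
  ∀ (s c : Nat) (t : Int) (b : Bool), memo.get? (s, c, t) = some b → b = FB M N mang s c t

theorem goodMemo_empty (M N : Int) (mang : List Int) : GoodMemo M N mang PySem.Dict.empty := by
  intro s c t b h; simp [PySem.Dict.get?_empty] at h

theorem feasB_eq (M N : Int) (mang : List Int) :
    (∀ (s c : Nat) (t : Int) memo, GoodMemo M N mang memo →
      (feasB M N mang s c t memo).1 = FB M N mang s c t ∧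
      GoodMemo M N mang (feasB M N mang s c t memo).2) ∧
    (∀ (i c : Nat) (t : Int) memo, GoodMemo M N mang memo →
      (anyLoopB M N mang i c t memo).1 = FL M N mang i c t ∧
      GoodMemo M N mang (anyLoopB M N mang i c t memo).2) := by
  refine feasB.mutual_induct M N mang
    (fun s c t memo => GoodMemo M N mang memo →
      (feasB M N mang s c t memo).1 = FB M N mang s c t ∧
      GoodMemo M N mang (feasB M N mang s c t memo).2)
    (fun i c t memo => GoodMemo M N mang memo →
      (anyLoopB M N mang i c t memo).1 = FL M N mang i c t ∧
      GoodMemo M N mang (anyLoopB M N mang i c t memo).2)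
    ?_ ?_ ?_ ?_ ?_ ?_ ?_
  · intro s c t memo h1 hg
    rw [feasB, FB]; simp [h1, hg]
  · intro s c t memo h1 h2 hg
    rw [feasB, FB]; simp [h1, h2, hg]
  · intro s c t memo h1 h2 r hr hg
    have hFB : FB M N mang s c t = FL M N mang s c t := by rw [FB]; simp [h1, h2]
    rw [feasB, if_neg h1, if_neg h2, hr]
    exact ⟨hg s c t r hr, hg⟩
  · intro s c t memo h1 h2 hr ih hg
    obtain ⟨ha, hgood⟩ := ih hg
    have hFB : FB M N mang s c t = FL M N mang s c t := by rw [FB]; simp [h1, h2]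
    rw [feasB, if_neg h1, if_neg h2, hr]
    refine ⟨by simpa [hFB] using ha, ?_⟩
    intro s' c' t' b hb
    simp only at hb
    rw [PySem.Dict.get?_insert] at hb
    split at hb
    · rename_i heq
      obtain ⟨hs, hc, ht⟩ : s' = s ∧ c' = c ∧ t' = t := by
        simpa [Prod.ext_iff] using heq
      subst hs; subst hc; subst ht
      cases hb
      rw [ha, hFB]
    · exact hgood s' c' t' b hb
  · intro i c t memo h
    dsimp only
    intro hp ih1 hg
    obtain ⟨ha, hgood⟩ := ih1 hg
    rw [anyLoopB, FL]
    simp only [dif_pos h]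
    simp only [hp, if_true]
    exact ⟨by rw [← ha, hp]; simp, hgood⟩
  · intro i c t memo h
    dsimp only
    intro hp ih1 ih2 hg
    obtain ⟨ha, hgood⟩ := ih1 hg
    obtain ⟨hb2, hgood2⟩ := ih2 hgood
    rw [anyLoopB, FL]
    simp only [dif_pos h]
    have hpf : (feasB M N mang (i + 1) (c + 1) (t + mang[i]) memo).1 = false :=
      Bool.eq_false_iff.mpr hp
    simp only [hpf, if_false, Bool.false_eq_true]
    have hFBfalse : FB M N mang (i + 1) (c + 1) (t + mang[i]) = false := by
      rw [← ha]; exact hpf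
    rw [hFBfalse]
    simpa using ⟨hb2, hgood2⟩
  · intro i c t memo h hg
    rw [anyLoopB, FL]
    simp [h, hg]

theorem reconInnerB_eq (M N : Int) (mang : List Int) (c : Nat) (t : Int) :
    ∀ (i : Nat) (memo : PySem.Dict (Nat × Nat × Int) Bool), GoodMemo M N mang memo →
      (reconInnerB M N mang c t i memo).map Prod.fst = RInner M N mang c t i ∧
      (∀ j m, reconInnerB M N mang c t i memo = some (j, m) → GoodMemo M N mang m) := by
  intro i memo
  fun_induction reconInnerB M N mang c t i memo with
  | case1 i memo h p hp =>
    intro hg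
    obtain ⟨ha, hgood⟩ := (feasB_eq M N mang).1 (i + 1) (c + 1) (t + mang[i]) memo hg
    rw [RInner]
    constructor
    · have hFBt : FB M N mang (i + 1) (c + 1) (t + mang[i]) = true := by
        rw [← ha]; exact hp
      rw [dif_pos h, if_pos hFBt]
      rfl
    · intro j m hjm
      cases hjm
      exact hgood
  | case2 i memo h p hp ih =>
    intro hg
    obtain ⟨ha, hgood⟩ := (feasB_eq M N mang).1 (i + 1) (c + 1) (t + mang[i]) memo hg
    obtain ⟨ih1, ih2⟩ := ih hgood
    have hFBf : FB M N mang (i + 1) (c + 1) (t + mang[i]) = false := by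
      rw [← ha]; exact Bool.eq_false_iff.mpr hp
    rw [RInner]
    simp only [dif_pos h, hFBf, Bool.false_eq_true, if_false]
    constructor
    · rw [← ih1]
      cases hrec : reconInnerB M N mang c t (i + 1) (feasB M N mang (i + 1) (c + 1) (t + mang[i]) memo).2 with
      | none => simp
      | some q => simp
    · intro j m hjm
      simp only [Option.map_eq_some_iff] at hjm
      obtain ⟨q, hq, hqe⟩ := hjm
      cases hqe
      exact ih2 q.1 q.2 (by rw [hq])
  | case3 i memo h =>
    intro _
    rw [RInner]
    simp [h]

theorem reconOuter_eq (M N : Int) (mang : List Int) :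
    ∀ (s c : Nat) (t : Int) (acc : List Int) (memo : PySem.Dict (Nat × Nat × Int) Bool),
      GoodMemo M N mang memo →
      reconOuterB M N mang s c t acc memo = ROuter M N mang s c t acc := by
  intro s c t acc memo
  fun_induction reconOuterB M N mang s c t acc memo with
  | case1 s c t acc memo h1 =>
    intro _; rw [ROuter]; simp [h1]
  | case2 s c t acc memo h1 hnone =>
    intro hg
    have := (reconInnerB_eq M N mang c t s memo hg).1
    rw [hnone] at this
    rw [ROuter, if_neg h1, ← this]
    simp
  | case3 s c t acc memo h1 i hle hlt memo' hsome ih =>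
    intro hg
    obtain ⟨h1', h2'⟩ := reconInnerB_eq M N mang c t s memo hg
    have hg' : GoodMemo M N mang memo' := h2' _ _ hsome
    have hR : RInner M N mang c t s = some ⟨i, hle, hlt⟩ := by
      rw [← h1', hsome]; rfl
    rw [ROuter, if_neg h1, hR, hsome]
    exact ih hg'

theorem ROuter_append (M N : Int) (mang : List Int) :
    ∀ (n : Nat) (s c : Nat) (t : Int) (acc1 acc2 : List Int), mang.length - s ≤ n →
      ROuter M N mang s c t (acc1 ++ acc2) = acc1 ++ ROuter M N mang s c t acc2 := by
  intro n
  induction n with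
  | zero =>
    intro s c t a1 a2 hn
    rw [ROuter, ROuter]
    have hR : RInner M N mang c t s = none := by
      rw [RInner]; have : ¬ s < mang.length := by omega
      simp [this]
    rw [hR]
    split <;> rfl
  | succ n ih =>
    intro s c t a1 a2 hn
    rw [ROuter, ROuter]
    by_cases h1 : (c : Int) = M
    · simp [h1]
    · rw [if_neg h1, if_neg h1]
      cases hR : RInner M N mang c t s with
      | none => rfl
      | some j =>
        obtain ⟨i, hle, hlt⟩ := j
        dsimp only
        rw [List.append_assoc]
        exact ih (i + 1) (c + 1) (t + mang[i]) a1 (a2 ++ [mang[i]]) (by omega)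

theorem FL_eq_isSome (M N : Int) (mang : List Int) (c : Nat) (t : Int) :
    ∀ (i : Nat), FL M N mang i c t = (RInner M N mang c t i).isSome := by
  intro i
  fun_induction RInner M N mang c t i with
  | case1 i h hFB => rw [FL]; simp [h, hFB]
  | case2 i h hFB ih =>
    rw [FL]
    simp only [dif_pos h, hFB, Bool.false_or, ih]
    cases RInner M N mang c t (i + 1) <;> simp
  | case3 i h => rw [FL]; simp [h]

theorem deQuyA_eq (M N : Int) (mang : List Int) :
    (∀ (s d : Nat) (t : Int) (acc : List Int),
      deQuyA M N mang s d t acc =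
        if FB M N mang s d t then some (ROuter M N mang s d t acc) else none) ∧
    (∀ (i d : Nat) (t : Int) (acc : List Int),
      loopA M N mang i d t acc =
        Option.map (fun j : {j : Nat // i ≤ j ∧ j < mang.length} =>
            ROuter M N mang (j.1 + 1) (d + 1) (t + mang[j.1]'j.2.2) (acc ++ [mang[j.1]'j.2.2]))
          (RInner M N mang d t i)) := by
  refine deQuyA.mutual_induct M N mang
    (fun s d t acc =>
      deQuyA M N mang s d t acc =
        if FB M N mang s d t then some (ROuter M N mang s d t acc) else none)
    (fun i d t acc =>
      loopA M N mang i d t acc =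
        Option.map (fun j : {j : Nat // i ≤ j ∧ j < mang.length} =>
            ROuter M N mang (j.1 + 1) (d + 1) (t + mang[j.1]'j.2.2) (acc ++ [mang[j.1]'j.2.2]))
          (RInner M N mang d t i))
    ?_ ?_ ?_ ?_ ?_ ?_ ?_ ?_
  · intro s d acc h1
    rw [deQuyA, FB, ROuter]
    simp [h1]
  · intro s d t acc h1 h2
    rw [deQuyA, FB]
    simp [h1, h2]
  · intro s d t acc h1 h2
    rw [deQuyA, FB]
    simp [h1, h2]
  · intro s d t acc h1 h2 ih
    have hFB : FB M N mang s d t = FL M N mang s d t := by rw [FB]; simp [h1, h2]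
    rw [deQuyA, if_neg h1, if_neg h2, ih, hFB, FL_eq_isSome]
    cases hR : RInner M N mang d t s with
    | none => simp
    | some j =>
      obtain ⟨i, hle, hlt⟩ := j
      simp only [Option.map_some, Option.isSome_some, if_true]
      conv_rhs => rw [ROuter]
      rw [if_neg h1, hR]
  · -- recursive call returned some kq with kq empty: impossible
    intro i d t acc h kq hkq hemp ih1 ih2
    exfalso
    rw [ih1] at hkq
    by_cases hFB : FB M N mang (i + 1) (d + 1) (t + mang[i]) = true
    · rw [if_pos hFB] at hkq
      have hkq' : kq = ROuter M N mang (i + 1) (d + 1) (t + mang[i]) (acc ++ [mang[i]]) :=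
        (Option.some_inj.mp hkq).symm
      have := ROuter_append M N mang (mang.length - (i + 1)) (i + 1) (d + 1)
        (t + mang[i]) (acc ++ [mang[i]]) [] (Nat.le_refl _)
      rw [List.append_nil] at this
      rw [hkq', this] at hemp
      simp at hemp
    · rw [if_neg hFB] at hkq
      simp at hkq
  · intro i d t acc h kq hkq hemp ih1
    rw [loopA]
    simp only [dif_pos h, hkq]
    have hemp' : kq.isEmpty = false := Bool.eq_false_iff.mpr hemp
    rw [hemp']
    simp only [Bool.false_eq_true, if_false]
    rw [ih1] at hkq
    by_cases hFB : FB M N mang (i + 1) (d + 1) (t + mang[i]) = true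
    · rw [if_pos hFB] at hkq
      have hR : RInner M N mang d t i = some ⟨i, Nat.le_refl i, h⟩ := by
        rw [RInner]; simp [h, hFB]
      rw [hR]
      simp only [Option.map_some]
      exact hkq.symm
    · rw [if_neg hFB] at hkq
      simp at hkq
  · intro i d t acc h hnone ih1 ih2
    rw [loopA]
    simp only [dif_pos h, hnone]
    rw [ih2]
    rw [ih1] at hnone
    have hFB : FB M N mang (i + 1) (d + 1) (t + mang[i]) = false := by
      by_cases hFB : FB M N mang (i + 1) (d + 1) (t + mang[i]) = true
      · rw [if_pos hFB] at hnone; exact absurd hnone (by simp)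
      · exact Bool.eq_false_iff.mpr hFB
    have hRi : RInner M N mang d t i =
        (RInner M N mang d t (i + 1)).map
          (fun q => ⟨q.1, by have := q.2; omega, by have := q.2; exact this.2⟩) := by
      rw [RInner]
      simp [h, hFB]
    rw [hRi]
    cases RInner M N mang d t (i + 1) with
    | none => rfl
    | some j => rfl
  · intro i d t acc h
    rw [loopA, RInner]
    simp [h]

-- ===== VERDICT (by name: the statement is the Claim_ definition above) =====
theorem timKiem_spec : Claim_equal_timKiem := by
  intro M N mang _
  unfold Spec_timKiem timKiem timKiem_alt
  obtain ⟨h1, h2⟩ := (feasB_eq M N mang).1 0 0 0 PySem.Dict.empty (goodMemo_empty M N mang)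
  rw [(deQuyA_eq M N mang).1]
  dsimp only
  rw [h1, reconOuter_eq M N mang 0 0 0 [] _ h2]
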